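/- GENERATED by mk_final_copies.py from the proof of the farm's unit `compute_codewords.8` (farm:compute_codewords.8.1: Proof.lean) as the
   re-elaboration sweep compiled it — do not edit. -/
import Asan.CheckWalk
import Vorbis.Spec.Units.compute_codewords_8

open X86 X86.User Asan Vorbis Vorbis.Spec
open Vorbis.Spec.compute_codewords

set_option maxRecDepth 4000
set_option maxHeartbeats 4000000

namespace Vorbis.Spec.compute_codewords_8

/-- **After `add_entry(c, code, j, m, len[j], values)` has returned to the body of compute_codewords** (`t` the state at its entry,
`r` the returned state): the body's footprint still holds (the cells written lie in `cwWindows u`, its frame in the function's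
stack), the live part of the stack `[rsp₀ − 296, rsp₀ + 8)` is untouched, and sparse: VAL grows by the symbol `values[m] = j < n`. -/
theorem cw8_add_entry_post {others : List Obj} {frames : List (Nat × FrameLayout)} {Blk : Block → Prop} {u t r : State}
    (hpre : CodewordsPre others frames Blk u)
    (he_room : 7340032 + 400 ≤ (u.reg .rsp).toNat) (he_top : (u.reg .rsp).toNat + 8 ≤ 8388608)
    (hsame : Mem.SameExcept (⟨(u.reg .rsp).toNat - 400, (u.reg .rsp).toNat⟩ ::
      ⟨0xC00000 + ((u.reg .rsp).toNat - 248) / 8, 0xC00000 + ((u.reg .rsp).toNat - 248) / 8 + 24⟩ :: cwWindows u) u.mem t.mem)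
    (h_rsp : t.reg .rsp = u.reg .rsp - 304) (h_rdi : t.reg .rdi = u.reg .rdi) (h_r9 : t.reg .r9 = u.reg .rcx)
    {j : Nat} (h_rdx : t.reg .rdx = Word.ofBV (BitVec.ofNat 32 j))
    (h_rcx : t.reg .rcx = Word.ofBV (BitVec.ofNat 32 (usedCount u.mem (u.reg .rsi).toNat j)))
    (hj : j < (u.reg .rdx).toNat % 2 ^ 32) (hused : u.mem.u8 ((u.reg .rsi).toNat + j) ≠ 255)
    (hw : Mem.SameExcept ((add_entry.spec others (((u.reg .rsp).toNat - 248, Vorbis.Frames.compute_codewords) :: frames)).footprint t)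
      t.mem r.mem)
    (hpost : AddEntryPost t r) :
    Mem.SameExcept (⟨(u.reg .rsp).toNat - 400, (u.reg .rsp).toNat⟩ ::
      ⟨0xC00000 + ((u.reg .rsp).toNat - 248) / 8, 0xC00000 + ((u.reg .rsp).toNat - 248) / 8 + 24⟩ :: cwWindows u) u.mem r.mem ∧
    Mem.EqOn ((u.reg .rsp).toNat - 296) ((u.reg .rsp).toNat + 8) t.mem r.mem ∧
    (Codebook.sparse u.mem (u.reg .rdi).toNat ≠ 0 →
      VAL t.mem (u.reg .rcx).toNat (usedCount u.mem (u.reg .rsi).toNat j) ((u.reg .rdx).toNat % 2 ^ 32) →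
      VAL r.mem (u.reg .rcx).toNat (usedCount u.mem (u.reg .rsi).toNat j + 1) ((u.reg .rdx).toNat % 2 ^ 32)) := by
  have hsh := hpre.shadow
  have hsp := hsh.rsp
  have hn24 := cw_n_lt hpre
  have hfld := cw_fields_kept hpre he_room he_top hsame
  have hjn : (Word.ofBV (BitVec.ofNat 32 j)).toNat = j := cw_cnt_toNat j (by omega)
  have hm_le := usedCount_le u.mem (u.reg .rsi).toNat j
  have hmn : (Word.ofBV (BitVec.ofNat 32 (usedCount u.mem (u.reg .rsi).toNat j))).toNat =
      usedCount u.mem (u.reg .rsi).toNat j := cw_cnt_toNat _ (by omega)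
  have e304 : (t.reg .rsp).toNat = (u.reg .rsp).toNat - 304 := by
    have hle : (304 : UInt64) ≤ u.reg .rsp := by
      rw [UInt64.le_iff_toNat_le]
      have : (304 : UInt64).toNat = 304 := by decide
      omega
    rw [h_rsp, UInt64.toNat_sub_of_le _ _ hle]
    rfl
  have hent := cw_entries_eq hpre
  simp only [X86.User.Spec.footprint, add_entry.spec_frame, e304] at hw
  by_cases hs : Codebook.sparse u.mem (u.reg .rdi).toNat = 0
  · -- dense: the one cell `codewords[j]` inside `cwBlock`
    have hst : Codebook.sparse t.mem (t.reg .rdi).toNat = 0 := by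
      rw [h_rdi, hfld.sparse]
      exact hs
    rw [add_entry.spec_writes_dense others _ t hst] at hw
    have e : (add_entry.denseCell t).span =
        ⟨Codebook.codewords u.mem (u.reg .rdi).toNat + 4 * j, Codebook.codewords u.mem (u.reg .rdi).toNat + 4 * j + 4⟩ := by
      show (⟨Codebook.codewords t.mem (t.reg .rdi).toNat + 4 * ((t.reg .rdx).toNat % 2 ^ 32),
        Codebook.codewords t.mem (t.reg .rdi).toNat + 4 * ((t.reg .rdx).toNat % 2 ^ 32) + 4⟩ : Span) = _
      rw [h_rdi, h_rdx, hjn, hfld.codewords, Nat.mod_eq_of_lt (by omega)]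
    rw [e] at hw
    have hB := (hpre.K3t.dense hs).codewords
    have hbw := blk_where hpre.live hsh.inv hsh.offText (by omega) hB
      (by show 1 ≤ 4 * (Codebook.entries u.mem (u.reg .rdi).toNat).toNat; omega)
    have hbw' : Codebook.codewords u.mem (u.reg .rdi).toNat + 4 * (Codebook.entries u.mem (u.reg .rdi).toNat).toNat ≤ 0xC00000 ∧
        ((u.reg .rsp).toNat + 8 ≤ Codebook.codewords u.mem (u.reg .rdi).toNat ∨
          Codebook.codewords u.mem (u.reg .rdi).toNat + 4 * (Codebook.entries u.mem (u.reg .rdi).toNat).toNat ≤ 0x700000 ∨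
          0x800000 ≤ Codebook.codewords u.mem (u.reg .rdi).toNat) := ⟨hbw.2.1, hbw.2.2⟩
    refine ⟨hsame.step_same hw ?_, hw.eqOn _ _ ?_, fun h => absurd hs h⟩
    · intro w hwm a h1 h2
      simp only [List.mem_cons, List.not_mem_nil, or_false] at hwm
      rcases hwm with e1 | e1
      · rw [e1] at h1 h2
        dsimp only at h1 h2
        refine ⟨⟨(u.reg .rsp).toNat - 400, (u.reg .rsp).toNat⟩, List.mem_cons_self, ?_, ?_⟩
        · dsimp only
          omega
        · dsimp only
          omega
      · rw [e1] at h1 h2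
        dsimp only at h1 h2
        refine ⟨(cwBlock u.mem (u.reg .rdi).toNat).span, ?_, ?_, ?_⟩
        · rw [cw_cwWindows_dense u hs]
          exact List.mem_cons_of_mem _ (List.mem_cons_of_mem _ List.mem_cons_self)
        · simp only [cwBlock, Block.span]
          omega
        · simp only [cwBlock, Block.span, Codebook.N_dense hs]
          omega
    · intro w hwm
      simp only [List.mem_cons, List.not_mem_nil, or_false] at hwm
      rcases hwm with e1 | e1
      · rw [e1]
        dsimp only
        omega
      · rw [e1]
        dsimp only
        omega
  · -- sparse: the three cells inside `cwBlock`, `clBlock`, the `values` block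
    have hst : Codebook.sparse t.mem (t.reg .rdi).toNat ≠ 0 := by
      rw [h_rdi, hfld.sparse]
      exact hs
    have hs1 : Codebook.sparse u.mem (u.reg .rdi).toNat = 1 := hpre.K2.sparse_one hs
    have hlt := cw_used_lt hpre hs hj hused
    obtain ⟨_, hvals⟩ := hpre.sparse hs
    have hcwB := hpre.K3t.sparse_codewords hs1
    have hclB := hpre.K3t.sparse_lengths hs1
    rw [add_entry.spec_writes_sparse others _ t hst] at hw
    have ecw : (add_entry.cwCell t).span =
        ⟨Codebook.codewords u.mem (u.reg .rdi).toNat + 4 * usedCount u.mem (u.reg .rsi).toNat j,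
          Codebook.codewords u.mem (u.reg .rdi).toNat + 4 * usedCount u.mem (u.reg .rsi).toNat j + 4⟩ := by
      show (⟨Codebook.codewords t.mem (t.reg .rdi).toNat + 4 * ((t.reg .rcx).toNat % 2 ^ 32),
        Codebook.codewords t.mem (t.reg .rdi).toNat + 4 * ((t.reg .rcx).toNat % 2 ^ 32) + 4⟩ : Span) = _
      rw [h_rdi, h_rcx, hmn, hfld.codewords, Nat.mod_eq_of_lt (by omega)]
    have ecl : (add_entry.lenCell t).span =
        ⟨Codebook.codeword_lengths u.mem (u.reg .rdi).toNat + usedCount u.mem (u.reg .rsi).toNat j,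
          Codebook.codeword_lengths u.mem (u.reg .rdi).toNat + usedCount u.mem (u.reg .rsi).toNat j + 1⟩ := by
      show (⟨Codebook.codeword_lengths t.mem (t.reg .rdi).toNat + (t.reg .rcx).toNat % 2 ^ 32,
        Codebook.codeword_lengths t.mem (t.reg .rdi).toNat + (t.reg .rcx).toNat % 2 ^ 32 + 1⟩ : Span) = _
      rw [h_rdi, h_rcx, hmn, hfld.codeword_lengths, Nat.mod_eq_of_lt (by omega)]
    have evl : (add_entry.valCell t).span =
        ⟨(u.reg .rcx).toNat + 4 * usedCount u.mem (u.reg .rsi).toNat j,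
          (u.reg .rcx).toNat + 4 * usedCount u.mem (u.reg .rsi).toNat j + 4⟩ := by
      show (⟨(t.reg .r9).toNat + 4 * ((t.reg .rcx).toNat % 2 ^ 32), (t.reg .r9).toNat + 4 * ((t.reg .rcx).toNat % 2 ^ 32) + 4⟩ : Span) = _
      rw [h_r9, h_rcx, hmn, Nat.mod_eq_of_lt (by omega)]
    rw [ecw, ecl, evl] at hw
    have hsize : 1 ≤ 4 * (Codebook.sorted_entries u.mem (u.reg .rdi).toNat).toNat := by
      omega
    have hsize1 : 1 ≤ (Codebook.sorted_entries u.mem (u.reg .rdi).toNat).toNat := by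
      omega
    have bcw := blk_where hpre.live hsh.inv hsh.offText (by omega) hcwB hsize
    have bcl := blk_where hpre.live hsh.inv hsh.offText (by omega) hclB hsize1
    have bvl := blk_where hpre.live hsh.inv hsh.offText (by omega) hvals hsize
    have bcw' : Codebook.codewords u.mem (u.reg .rdi).toNat + 4 * (Codebook.sorted_entries u.mem (u.reg .rdi).toNat).toNat ≤ 0xC00000 ∧
        ((u.reg .rsp).toNat + 8 ≤ Codebook.codewords u.mem (u.reg .rdi).toNat ∨
          Codebook.codewords u.mem (u.reg .rdi).toNat + 4 * (Codebook.sorted_entries u.mem (u.reg .rdi).toNat).toNat ≤ 0x700000 ∨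
          0x800000 ≤ Codebook.codewords u.mem (u.reg .rdi).toNat) := ⟨bcw.2.1, bcw.2.2⟩
    have bcl' : Codebook.codeword_lengths u.mem (u.reg .rdi).toNat + (Codebook.sorted_entries u.mem (u.reg .rdi).toNat).toNat ≤ 0xC00000 ∧
        ((u.reg .rsp).toNat + 8 ≤ Codebook.codeword_lengths u.mem (u.reg .rdi).toNat ∨
          Codebook.codeword_lengths u.mem (u.reg .rdi).toNat + (Codebook.sorted_entries u.mem (u.reg .rdi).toNat).toNat ≤ 0x700000 ∨
          0x800000 ≤ Codebook.codeword_lengths u.mem (u.reg .rdi).toNat) := ⟨bcl.2.1, bcl.2.2⟩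
    have bvl' : (u.reg .rcx).toNat + 4 * (Codebook.sorted_entries u.mem (u.reg .rdi).toNat).toNat ≤ 0xC00000 ∧
        ((u.reg .rsp).toNat + 8 ≤ (u.reg .rcx).toNat ∨
          (u.reg .rcx).toNat + 4 * (Codebook.sorted_entries u.mem (u.reg .rdi).toNat).toNat ≤ 0x700000 ∨
          0x800000 ≤ (u.reg .rcx).toNat) := ⟨bvl.2.1, bvl.2.2⟩
    clear bcw bcl bvl
    -- the blocks are pairwise apart
    have hap := hpre.apartSparse hs
    have p1 := List.pairwise_cons.mp hap
    have p2 := List.pairwise_cons.mp p1.2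
    have p3 := List.pairwise_cons.mp p2.2
    have p4 := List.pairwise_cons.mp p3.2
    have d_cw_val := p3.1 ⟨(u.reg .rcx).toNat, 4 * (Codebook.sorted_entries u.mem (u.reg .rdi).toNat).toNat⟩
      (by simp only [List.mem_cons, true_or, or_true])
    have d_cl_val := p4.1 ⟨(u.reg .rcx).toNat, 4 * (Codebook.sorted_entries u.mem (u.reg .rdi).toNat).toNat⟩
      (by simp only [List.mem_cons, true_or, or_true])
    simp only [cwBlock, clBlock, Codebook.N_sparse hs, Block.disjoint] at d_cw_val d_cl_val
    refine ⟨hsame.step_same hw ?_, hw.eqOn _ _ ?_, ?_⟩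
    · intro w hwm a h1 h2
      simp only [List.mem_cons, List.not_mem_nil, or_false] at hwm
      rcases hwm with e1 | e1 | e1 | e1
      · rw [e1] at h1 h2
        dsimp only at h1 h2
        refine ⟨⟨(u.reg .rsp).toNat - 400, (u.reg .rsp).toNat⟩, List.mem_cons_self, ?_, ?_⟩
        · dsimp only
          omega
        · dsimp only
          omega
      · rw [e1] at h1 h2
        dsimp only at h1 h2
        refine ⟨(cwBlock u.mem (u.reg .rdi).toNat).span, ?_, ?_, ?_⟩
        · rw [cw_cwWindows_sparse u hs]
          exact List.mem_cons_of_mem _ (List.mem_cons_of_mem _ List.mem_cons_self)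
        · simp only [cwBlock, Block.span]
          omega
        · simp only [cwBlock, Block.span, Codebook.N_sparse hs]
          omega
      · rw [e1] at h1 h2
        dsimp only at h1 h2
        refine ⟨(clBlock u.mem (u.reg .rdi).toNat).span, ?_, ?_, ?_⟩
        · rw [cw_cwWindows_sparse u hs]
          exact List.mem_cons_of_mem _ (List.mem_cons_of_mem _ (List.mem_cons_of_mem _ List.mem_cons_self))
        · simp only [clBlock, Block.span]
          omega
        · simp only [clBlock, Block.span, Codebook.N_sparse hs]
          omega
      · rw [e1] at h1 h2
        dsimp only at h1 h2
        refine ⟨⟨(u.reg .rcx).toNat, (u.reg .rcx).toNat + 4 * (Codebook.sorted_entries u.mem (u.reg .rdi).toNat).toNat⟩, ?_, ?_, ?_⟩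
        · rw [cw_cwWindows_sparse u hs]
          exact List.mem_cons_of_mem _ (List.mem_cons_of_mem _ (List.mem_cons_of_mem _
            (List.mem_cons_of_mem _ List.mem_cons_self)))
        · dsimp only
          omega
        · dsimp only
          omega
    · intro w hwm
      simp only [List.mem_cons, List.not_mem_nil, or_false] at hwm
      rcases hwm with e1 | e1 | e1 | e1
      · rw [e1]
        dsimp only
        omega
      · rw [e1]
        dsimp only
        omega
      · rw [e1]
        dsimp only
        omega
      · rw [e1]
        dsimp only
        omega
    · intro _ hval
      have hv := (hpost.sparse hst).2.2
      have evb : (add_entry.valCell t).base = (u.reg .rcx).toNat + 4 * usedCount u.mem (u.reg .rsi).toNat j := by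
        show (t.reg .r9).toNat + 4 * ((t.reg .rcx).toNat % 2 ^ 32) = _
        rw [h_r9, h_rcx, hmn, Nat.mod_eq_of_lt (by omega)]
      rw [evb] at hv
      refine VAL.store hval (hw.eqOn _ _ ?_) (by omega) ?_
      · intro w hwm
        simp only [List.mem_cons, List.not_mem_nil, or_false] at hwm
        rcases hwm with e1 | e1 | e1 | e1
        · rw [e1]
          dsimp only
          omega
        · rw [e1]
          dsimp only
          omega
        · rw [e1]
          dsimp only
          omega
        · rw [e1]
          dsimp only
          omega
      · rw [hv]
        show (t.reg .rdx).toNat % 2 ^ 32 < _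
        rw [h_rdx, hjn, Nat.mod_eq_of_lt (by omega)]
        exact hj

/-- `CwBody.carry` for this segment's stores (`available[z] = 0`, `[rsp₀ − 276] = m + 1`, dead return addresses, add_entry's frame and
cells): the memories agree on the three groups of slots `[rsp₀ − 296, rsp₀ − 276)` (len, n), `[rsp₀ − 272, rsp₀ − 256)` (c, values) and
`[rsp₀ − 48, rsp₀ + 8)` (the saved registers, the return address). -/
theorem cw8_carry3 {u₀ u : State} {ret : Word} {ws ws' : List Span} {s s' : State} (hb : CwBody u₀ u ret ws s)
    (hE1 : Mem.EqOn ((u.reg .rsp).toNat - 296) ((u.reg .rsp).toNat - 276) s.mem s'.mem)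
    (hE2 : Mem.EqOn ((u.reg .rsp).toNat - 272) ((u.reg .rsp).toNat - 256) s.mem s'.mem)
    (hE3 : Mem.EqOn ((u.reg .rsp).toNat - 48) ((u.reg .rsp).toNat + 8) s.mem s'.mem)
    (hroom : 0x700000 + 400 ≤ (u.reg .rsp).toNat) (htop : (u.reg .rsp).toNat + 8 ≤ 0x800000)
    (hrsp : s'.reg .rsp = u.reg .rsp - 296) (hcode : Mem.EqOn Vorbis.L.textLo Vorbis.L.textHi u₀.mem s'.mem)
    (hdf : s'.flags .df = false) (hmx : s'.mxcsr &&& 0x1F80 = 0x1F80)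
    (hsame : Mem.SameExcept (⟨(u.reg .rsp).toNat - 400, (u.reg .rsp).toNat⟩ ::
      ⟨0xC00000 + ((u.reg .rsp).toNat - 248) / 8, 0xC00000 + ((u.reg .rsp).toNat - 248) / 8 + 24⟩ :: ws') u.mem s'.mem)
    (hshadow : ShadowUntouched (cw_poisonedMem u) s'.mem) : CwBody u₀ u ret ws' s' := by
  obtain ⟨-, -, -, -, -, -, hs0, hs1, hs2, hs3, hs4, hs5, hs6, hsLen, hsC, hsVal, hsN⟩ := hb
  refine ⟨hrsp, hcode, hdf, hmx, hsame, hshadow, ?_, ?_, ?_, ?_, ?_, ?_, ?_, ?_, ?_, ?_, ?_⟩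
  · rw [hE3.readLE _ _ (by u_omega) (by u_omega) (by u_omega)]
    exact hs0
  · rw [hE3.readLE _ _ (by u_omega) (by u_omega) (by u_omega)]
    exact hs1
  · rw [hE3.readLE _ _ (by u_omega) (by u_omega) (by u_omega)]
    exact hs2
  · rw [hE3.readLE _ _ (by u_omega) (by u_omega) (by u_omega)]
    exact hs3
  · rw [hE3.readLE _ _ (by u_omega) (by u_omega) (by u_omega)]
    exact hs4
  · rw [hE3.readLE _ _ (by u_omega) (by u_omega) (by u_omega)]
    exact hs5
  · rw [hE3.readLE _ _ (by u_omega) (by u_omega) (by u_omega)]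
    exact hs6
  · rw [hE1.readLE _ _ (by u_omega) (by u_omega) (by u_omega)]
    exact hsLen
  · rw [hE2.readLE _ _ (by u_omega) (by u_omega) (by u_omega)]
    exact hsC
  · rw [hE2.readLE _ _ (by u_omega) (by u_omega) (by u_omega)]
    exact hsVal
  · rw [hE1.readLE _ _ (by u_omega) (by u_omega) (by u_omega)]
    exact hsN

/-- `lea eax, [r12 + 1]` on the count `m < 2^24`: the 32-bit value is `m + 1`. -/
theorem cw8_inc (m : Nat) (hm : m < 16777216) :
    (BitVec.setWidth 32 (Word.ofBV (BitVec.ofNat 32 m) + 1).toBitVec).toNat = m + 1 := by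
  have e1 : (1 : UInt64).toNat = 1 := by decide
  rw [BitVec.toNat_setWidth, UInt64.toNat_toBitVec, UInt64.toNat_add, cw_cnt_toNat m (by omega), e1]
  omega

end Vorbis.Spec.compute_codewords_8

theorem Vorbis.Spec.Worked.compute_codewords_8_ok : Vorbis.Spec.compute_codewords_8.Statement := by
  intro Lay hLay μ hμ u₀ hcode haddentry hload4 hbitrev others frames Blk u ret i z v hat
  have he := hat.entry
  v_entry he
  have hpre := hat.pre
  have hsh := hpre.shadow
  have hsp := hsh.rsp
  have hn24 := cw_n_lt hpre
  have hinvB := cw_inv_pushed hsh he_align he_room he_top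
  have hLive := cw_blkLive_pushed ((u.reg .rsp).toNat - 248) Vorbis.Frames.compute_codewords hpre.live
  have hilt := hat.i_lt
  have hused := hat.used
  have hl31 := cw_len_le31 hpre hilt hused
  have hzpos := hat.z_pos
  have hzle := hat.z_le
  have hw : Vorbis.L.textHi ≤ (u.reg .rsi).toNat ∧ (u.reg .rsi).toNat + (u.reg .rdx).toNat % 2 ^ 32 ≤ 0xC00000 ∧
      ((u.reg .rsp).toNat + 8 ≤ (u.reg .rsi).toNat ∨ (u.reg .rsi).toNat + (u.reg .rdx).toNat % 2 ^ 32 ≤ 0x700000 ∨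
        0x800000 ≤ (u.reg .rsi).toNat) :=
    blk_where hpre.live hsh.inv hsh.offText (by omega) hpre.lens (by show 1 ≤ (u.reg .rdx).toNat % 2 ^ 32; omega)
  have hval := hat.val
  have hslot := hat.slot
  have w_rip := hat.rip
  have w_r13 := hat.r13
  have w_r12 := hat.r12
  have w_rbp := hat.rbp
  have w_rbx := hat.rbx
  have w_r15 := hat.r15
  have w_rdi := hat.rdi
  have hbK := hat.body
  obtain ⟨w_rsp, w_eq, hdf, hmx, hsame, hbody, hs0, hs1, hs2, hs3, hs4, hs5, hs6, hsLen, hsC, hsVal, hsN⟩ := hat.body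
  have w_sse : SseOK v := ⟨hmx⟩
  have w_kept := cw_kept_all u v
  unfold cw_allRegs at w_kept
  have haddr := cw_idx_addr i (u.reg .rsi) (by omega) (by omega)
  have hbyte : v.mem.readLE (Word.ofBV (BitVec.signExtend 64 (BitVec.ofNat 32 i)) + u.reg .rsi) 1 =
      u.mem.u8 ((u.reg .rsi).toNat + i) :=
    cw_len_kept hpre he_room he_top hsame hilt _ haddr
  have hP : 0x119d40 ≤ (Word.ofBV (BitVec.signExtend 64 (BitVec.ofNat 32 i)) + u.reg .rsi).toNat ∧
      (Word.ofBV (BitVec.signExtend 64 (BitVec.ofNat 32 i)) + u.reg .rsi).toNat + 1 ≤ 0xC00000 ∧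
      ((u.reg .rsp).toNat + 8 ≤ (Word.ofBV (BitVec.signExtend 64 (BitVec.ofNat 32 i)) + u.reg .rsi).toNat ∨
        (Word.ofBV (BitVec.signExtend 64 (BitVec.ofNat 32 i)) + u.reg .rsi).toNat + 1 ≤ 0x700000 ∨
        0x800000 ≤ (Word.ofBV (BitVec.signExtend 64 (BitVec.ofNat 32 i)) + u.reg .rsi).toNat) := by
    rw [haddr]
    have h1 : Vorbis.L.textHi = 0x119d40 := rfl
    omega
  clear hw
  have hA := cw_avail_addr (u.reg .rsp) z (by omega) he_room he_top
  have ea1 : ((u.reg .rsp - 248) >>> 3 + 12582912).toNat = 12582912 + ((u.reg .rsp).toNat - 248) / 8 := by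
    u_omega
  have ea2 : ((u.reg .rsp - 248) >>> 3 + 12582932).toNat = 12582932 + ((u.reg .rsp).toNat - 248) / 8 := by
    u_omega
  obtain ⟨res, hres⟩ : ∃ r : Nat,
      v.mem.readLE (u.reg .rsp - 296 + Word.ofBV (BitVec.signExtend 64 (BitVec.ofNat 32 z)) * 4 + 80) 4 = r := ⟨_, rfl⟩
  have hbr' := hbitrev others (((u.reg .rsp).toNat - 248, Vorbis.Frames.compute_codewords) :: frames)
  have hae' := haddentry others (((u.reg .rsp).toNat - 248, Vorbis.Frames.compute_codewords) :: frames)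
  u_walk hcode [hμ.vendor] until [Vorbis.L.compute_codewords.cut6] span [Vorbis.L.textLo, Vorbis.L.textHi] side (v_side)
  · -- check_1082ee: `available[z]`, `1 ≤ z ≤ len[i] ≤ 31`
    have hun : ShadowUntouched (cw_poisonedMem u) s_1082ee.mem := by
      rw [w_mem]
      exact Mem.EqOn.step_writeLE _ _ _ hbody (by u_omega) (by u_omega)
    exact cw_check_available (u.reg .rsp).toNat hinvB hun (by omega) _ z (by omega) hA
  · v_inv
  · -- bit_reverse's precondition: the shadow layer with the frame pushed
    refine ⟨?_, hsh.offText⟩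
    have e : (s_108312.reg .rsp).toNat + 8 = (u.reg .rsp).toNat - 296 := by
      rw [w_rsp]
      u_omega
    rw [e, w_mem]
    refine hinvB.untouched ?_
    exact Mem.EqOn.step_writeLE _ _ _ (Mem.EqOn.step_writeLE _ _ _ (Mem.EqOn.step_writeLE _ _ _ (Mem.EqOn.step_writeLE _ _ _ hbody
      (by u_omega) (by u_omega)) (by u_omega) (by u_omega)) (by u_omega) (by u_omega)) (by u_omega) (by u_omega)
  · -- cut6 0x108317, after bit_reverse: the memory is the call state's
    have w_mem : s_108312r.mem = _ := (show s_108312r.mem = s_108312.mem from w_post).trans w_mem_108312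
    have w_eq := Vorbis.conv_code_eqOn w_code
    have hdf6 : s_108312r.flags .df = false := (show X86.User.abiInv _ from w_inv).1
    have hmx6 : s_108312r.mxcsr &&& 0x1F80 = 0x1F80 := (show X86.User.abiInv _ from w_inv).2
    have w_sse6 : SseOK s_108312r := ⟨hmx6⟩
    clear w_same w_post w_code w_inv w_mem_108312 w_kept_108312 w_rax_108312 w_rbx_108312 w_rsp_108312 w_rbp_108312 w_rdi_108312
      w_r12_108312 w_r13_108312 w_r14_108312 w_r15_108312 hbr'
    u_walk hcode [hμ.vendor] until [Vorbis.L.compute_codewords.cut7] span [Vorbis.L.textLo, Vorbis.L.textHi] side (v_side)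
    · v_inv
    · -- add_entry's precondition
      have hsame_t : Mem.SameExcept (⟨(u.reg .rsp).toNat - 400, (u.reg .rsp).toNat⟩ ::
          ⟨0xC00000 + ((u.reg .rsp).toNat - 248) / 8, 0xC00000 + ((u.reg .rsp).toNat - 248) / 8 + 24⟩ :: cwWindows u)
          u.mem s_10832d.mem := by
        u_same
      have hun_t : ShadowUntouched (cw_poisonedMem u) s_10832d.mem := by
        rw [w_mem]
        exact Mem.EqOn.step_writeLE _ _ _ (Mem.EqOn.step_writeLE _ _ _ (Mem.EqOn.step_writeLE _ _ _ (Mem.EqOn.step_writeLE _ _ _ hbody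
          (by u_omega) (by u_omega)) (by u_omega) (by u_omega)) (by u_omega) (by u_omega)) (by u_omega) (by u_omega)
      exact cw_add_entry_pre hpre he_align he_room he_top hsame_t hun_t w_rsp w_rdi w_r9
        w_rdx w_rcx hilt hused
    · -- cut7 0x108332, after add_entry
      have hsame_t : Mem.SameExcept (⟨(u.reg .rsp).toNat - 400, (u.reg .rsp).toNat⟩ ::
          ⟨0xC00000 + ((u.reg .rsp).toNat - 248) / 8, 0xC00000 + ((u.reg .rsp).toNat - 248) / 8 + 24⟩ :: cwWindows u)
          u.mem s_10832d.mem := by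
        u_same
      have hun_t : ShadowUntouched (cw_poisonedMem u) s_10832d.mem := by
        rw [w_mem_10832d]
        exact Mem.EqOn.step_writeLE _ _ _ (Mem.EqOn.step_writeLE _ _ _ (Mem.EqOn.step_writeLE _ _ _ (Mem.EqOn.step_writeLE _ _ _ hbody
          (by u_omega) (by u_omega)) (by u_omega) (by u_omega)) (by u_omega) (by u_omega)) (by u_omega) (by u_omega)
      obtain ⟨hsame_r, hE_r, hval_r⟩ := Vorbis.Spec.compute_codewords_8.cw8_add_entry_post hpre he_room he_top hsame_t
        w_rsp_10832d w_rdi_10832d w_r9_10832d w_rdx_10832d w_rcx_10832d hilt hused w_same w_post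
      have hun_r : ShadowUntouched (cw_poisonedMem u) s_10832dr.mem := Mem.EqOn.trans hun_t w_post.untouched
      -- the live stack from `v` to the returned state, in the three groups of slots
      have hE1 : Mem.EqOn ((u.reg .rsp).toNat - 296) ((u.reg .rsp).toNat - 276) v.mem s_10832dr.mem := by
        refine Mem.EqOn.trans ?_ (hE_r.mono (by omega) (by omega))
        rw [w_mem_10832d]
        exact Mem.EqOn.step_writeLE _ _ _ (Mem.EqOn.step_writeLE _ _ _ (Mem.EqOn.step_writeLE _ _ _ (Mem.EqOn.step_writeLE _ _ _
          (Mem.EqOn.refl _ _ _) (by u_omega) (by u_omega)) (by u_omega) (by u_omega)) (by u_omega) (by u_omega)) (by u_omega) (by u_omega)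
      have hE2 : Mem.EqOn ((u.reg .rsp).toNat - 272) ((u.reg .rsp).toNat - 256) v.mem s_10832dr.mem := by
        refine Mem.EqOn.trans ?_ (hE_r.mono (by omega) (by omega))
        rw [w_mem_10832d]
        exact Mem.EqOn.step_writeLE _ _ _ (Mem.EqOn.step_writeLE _ _ _ (Mem.EqOn.step_writeLE _ _ _ (Mem.EqOn.step_writeLE _ _ _
          (Mem.EqOn.refl _ _ _) (by u_omega) (by u_omega)) (by u_omega) (by u_omega)) (by u_omega) (by u_omega)) (by u_omega) (by u_omega)
      have hE3 : Mem.EqOn ((u.reg .rsp).toNat - 48) ((u.reg .rsp).toNat + 8) v.mem s_10832dr.mem := by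
        refine Mem.EqOn.trans ?_ (hE_r.mono (by omega) (by omega))
        rw [w_mem_10832d]
        exact Mem.EqOn.step_writeLE _ _ _ (Mem.EqOn.step_writeLE _ _ _ (Mem.EqOn.step_writeLE _ _ _ (Mem.EqOn.step_writeLE _ _ _
          (Mem.EqOn.refl _ _ _) (by u_omega) (by u_omega)) (by u_omega) (by u_omega)) (by u_omega) (by u_omega)) (by u_omega) (by u_omega)
      have hE4 : Mem.EqOn ((u.reg .rsp).toNat - 256) ((u.reg .rsp).toNat - 248) v.mem s_10832dr.mem := by
        refine Mem.EqOn.trans ?_ (hE_r.mono (by omega) (by omega))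
        rw [w_mem_10832d]
        exact Mem.EqOn.step_writeLE _ _ _ (Mem.EqOn.step_writeLE _ _ _ (Mem.EqOn.step_writeLE _ _ _ (Mem.EqOn.step_writeLE _ _ _
          (Mem.EqOn.refl _ _ _) (by u_omega) (by u_omega)) (by u_omega) (by u_omega)) (by u_omega) (by u_omega)) (by u_omega) (by u_omega)
      have hm24 : usedCount u.mem (u.reg .rsi).toNat i < 16777216 := by
        have := usedCount_le u.mem (u.reg .rsi).toNat i
        omega
      have hcount : usedCount u.mem (u.reg .rsi).toNat (i + 1) = usedCount u.mem (u.reg .rsi).toNat i + 1 :=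
        usedCount_succ_used hused
      -- the two loads of the rest of the walk: `len[i]` (0x108332) and the slot `[rsp+14H] = m + 1` (0x10833c)
      have hbyte7 : s_10832dr.mem.readLE (Word.ofBV (BitVec.signExtend 64 (BitVec.ofNat 32 i)) + u.reg .rsi) 1 =
          u.mem.u8 ((u.reg .rsi).toNat + i) :=
        cw_len_kept hpre he_room he_top hsame_r hilt _ haddr
      have hslotM : s_10832dr.mem.readLE (u.reg .rsp - 276) 4 = usedCount u.mem (u.reg .rsi).toNat (i + 1) := by
        rw [hE_r.readLE _ _ (by u_omega) (by u_omega) (by u_omega), w_mem_10832d, hcount,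
          ← Vorbis.Spec.compute_codewords_8.cw8_inc _ hm24]
        have hlt := (BitVec.setWidth 32 (Word.ofBV (BitVec.ofNat 32 (usedCount u.mem (u.reg .rsi).toNat i)) + 1).toBitVec).isLt
        u_read
      have hslot7 : UInt64.ofNat (s_10832dr.mem.readLE (u.reg .rsp - 256) 8) = (u.reg .rsp - 248) >>> 3 := by
        rw [hE4.readLE _ _ (by u_omega) (by u_omega) (by u_omega)]
        exact hslot
      have w_eq := Vorbis.conv_code_eqOn w_code
      have hdf7 : s_10832dr.flags .df = false := (show X86.User.abiInv _ from w_inv).1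
      have hmx7 : s_10832dr.mxcsr &&& 0x1F80 = 0x1F80 := (show X86.User.abiInv _ from w_inv).2
      have w_sse7 : SseOK s_10832dr := ⟨hmx7⟩
      have hbK7 : CwBody u₀ u ret (cwWindows u) s_10832dr :=
        Vorbis.Spec.compute_codewords_8.cw8_carry3 hbK hE1 hE2 hE3 he_room he_top w_rsp w_eq hdf7 hmx7 hsame_r hun_r
      -- sparse: VAL at add_entry's entry (only the function's stack was written since `v`), then one more symbol
      have hval_r' : Codebook.sparse u.mem (u.reg .rdi).toNat ≠ 0 →
          VAL s_10832dr.mem (u.reg .rcx).toNat (usedCount u.mem (u.reg .rsi).toNat (i + 1)) ((u.reg .rdx).toNat % 2 ^ 32) := by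
        intro hs
        rw [hcount]
        refine hval_r hs ?_
        refine cw_val_carry hpre he_room he_top hs (cw_used_le hpre hs (Nat.le_of_lt hilt)) (hval hs)
          (ws := [⟨(u.reg .rsp).toNat - 400, (u.reg .rsp).toNat⟩]) ?_ ?_
        · rw [w_mem_10832d]
          exact (((Mem.SameExcept.writeLE _ _ _ _ _ (by u_omega) ⟨_, List.mem_singleton.mpr rfl, by u_omega, by u_omega⟩).step_writeLE
            _ _ _ (by u_omega) ⟨_, List.mem_singleton.mpr rfl, by u_omega, by u_omega⟩).step_writeLE
            _ _ _ (by u_omega) ⟨_, List.mem_singleton.mpr rfl, by u_omega, by u_omega⟩).step_writeLE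
            _ _ _ (by u_omega) ⟨_, List.mem_singleton.mpr rfl, by u_omega, by u_omega⟩
        · intro w hwm
          have e := List.mem_singleton.mp hwm
          subst e
          left
          show 7340032 ≤ (u.reg .rsp).toNat - 400 ∧ (u.reg .rsp).toNat ≤ (u.reg .rsp).toNat + 8
          omega
      have hblt := Mem.u8_lt u.mem ((u.reg .rsi).toNat + i)
      have hz : (BitVec.zeroExtend 32 (BitVec.ofNat 8 (u.mem.u8 ((u.reg .rsi).toNat + i)))).toNat =
          u.mem.u8 ((u.reg .rsi).toNat + i) := by
        simp only [BitVec.zeroExtend, BitVec.toNat_setWidth, BitVec.toNat_ofNat]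
        omega
      have hzeq : BitVec.zeroExtend 32 (BitVec.ofNat 8 (u.mem.u8 ((u.reg .rsi).toNat + i))) =
          BitVec.ofNat 32 (u.mem.u8 ((u.reg .rsi).toNat + i)) := by
        apply BitVec.eq_of_toNat_eq
        rw [hz, BitVec.toNat_ofNat]
        omega
      clear w_same w_post w_code w_inv hE1 hE2 hE3 hE4 hE_r hsame_t hun_t w_mem_10832d w_kept_10832d hae' hval_r hbyte hres
      u_walk hcode [hμ.vendor] until [Vorbis.L.compute_codewords.cut8, Vorbis.L.compute_codewords.cut9] span [Vorbis.L.textLo, Vorbis.L.textHi] side (v_side)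
      · -- `len[i] ≠ z`: on to the head of loop 1150 (`AtProp i z`)
        have hE : Mem.EqOn ((u.reg .rsp).toNat - 296) ((u.reg .rsp).toNat + 8) s_10832dr.mem s_10833a.mem := by
          rw [w_mem]
          exact Mem.EqOn.refl _ _ _
        have hi : X86.User.abiInv s_10833a := by
          v_inv
        refine ReachVia.done (Or.inr ?_)
        refine { entry := hat.entry, pre := hpre,
                 body := hbK7.carry hE he_room he_top w_rsp w_eq hi.1 hi.2 (by rw [w_mem]; exact hsame_r) (by rw [w_mem]; exact hun_r),
                 rip := w_rip, i_lt := hilt, used := hused, z_pos := hzpos, z_le := hzle, r13 := w_r13, r12 := ?_, rbx := w_rbx,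
                 slot := (by rw [w_mem]; exact hslot7), slotM := (by rw [w_mem]; exact hslotM),
                 val := (by rw [w_mem]; exact hval_r') }
        rw [w_r12, hzeq]
      · -- `len[i] = z`: nothing to propagate: `m + 1` reloaded, `++i`, the head of the main loop
        have hE : Mem.EqOn ((u.reg .rsp).toNat - 296) ((u.reg .rsp).toNat + 8) s_10832dr.mem s_108341.mem := by
          rw [w_mem]
          exact Mem.EqOn.refl _ _ _
        have hi : X86.User.abiInv s_108341 := by
          v_inv
        refine ReachVia.done (Or.inl ?_)
        refine { entry := hat.entry, pre := hpre,
                 body := hbK7.carry hE he_room he_top w_rsp w_eq hi.1 hi.2 (by rw [w_mem]; exact hsame_r) (by rw [w_mem]; exact hun_r),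
                 rip := w_rip, r13 := ?_, r12 := w_r12, slot := (by rw [w_mem]; exact hslot7), i_le := hilt,
                 val := (by rw [w_mem]; exact hval_r') }
        rw [w_r13]
        exact cw_inc_lit32 i
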